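-- pv_equiv track=rewrite | github.com/AndrewDykstra/catan-ai | catan_spots_clean.py | best_picks
-- ===== SOURCE A (Python) =====
-- vertex_neighbors = [[3, 4], [4, 5], [5, 6],
--                     [0, 7], [0, 1, 8], [1, 2, 9], [2, 10],
--                     [3, 11, 12], [4, 12, 13], [5, 13, 14], [6, 14, 15],
--                     [7, 16], [7, 8, 17], [8, 9, 18],  [9, 10, 19], [10, 20],
--                     [11, 21, 22], [12, 22, 23], [13, 23, 24], [14, 24, 25], [15, 25, 26],
--                     [16, 27], [16, 17, 28], [17, 18, 29], [18, 19, 30], [19, 20, 31], [20, 32],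
--                     [21, 33], [22, 33, 34], [23, 34, 35], [24, 35, 36], [25, 36, 37], [26, 37],
--                     [27, 28, 38], [28, 29, 39], [29, 30, 40], [30, 31, 41], [31, 32, 42],
--                     [33, 43], [34, 43, 44], [35, 44, 45], [36, 45, 46], [37, 46],
--                     [38, 39, 47], [39, 40, 48], [40, 41, 49], [41, 42, 50],
--                     [43, 51], [44, 51, 52], [45, 52, 53], [46, 53],
--                     [47, 48], [48, 49], [49, 50]]
--
-- def best_picks(pairs, vertices):
--     greedy_pairs = []
--     greedy_vertices = {}
--     drop_point = 0
--
--     for i in range(0, len(pairs)):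
--         if not (pairs[i][0] in greedy_vertices):
--             greedy_vertices[pairs[i][0]]=(vertices[pairs[i][0]])
--         if not (pairs[i][1] in greedy_vertices):
--             greedy_vertices[pairs[i][1]]=(vertices[pairs[i][1]])
--         if (check_valid_pair(pairs[i], greedy_pairs)):
--             greedy_pairs.append(pairs[i])
--         if len(greedy_pairs) == 4:
--             drop_point = i
--             break
--     return pairs[0:(drop_point+1)], greedy_vertices
--
-- def check_valid_pair(pair, previouspairs):
--     x = pair[0]
--     y = pair[1]
--     for each in previouspairs:
--         a = each[0]
--         b = each[1]
--         if((x == a) or (x == b) or (y == a) or (y == b)):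
--             return False
--         if ((x in vertex_neighbors[(a)]) or (x in vertex_neighbors[(b)]) or
--             (y in vertex_neighbors[(a)]) or (y in vertex_neighbors[(b)])):
--             return False
--
--     return True
-- ===== SOURCE B (Python) =====
-- vertex_neighbors = [[3, 4], [4, 5], [5, 6],
--                     [0, 7], [0, 1, 8], [1, 2, 9], [2, 10],
--                     [3, 11, 12], [4, 12, 13], [5, 13, 14], [6, 14, 15],
--                     [7, 16], [7, 8, 17], [8, 9, 18],  [9, 10, 19], [10, 20],
--                     [11, 21, 22], [12, 22, 23], [13, 23, 24], [14, 24, 25], [15, 25, 26],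
--                     [16, 27], [16, 17, 28], [17, 18, 29], [18, 19, 30], [19, 20, 31], [20, 32],
--                     [21, 33], [22, 33, 34], [23, 34, 35], [24, 35, 36], [25, 36, 37], [26, 37],
--                     [27, 28, 38], [28, 29, 39], [29, 30, 40], [30, 31, 41], [31, 32, 42],
--                     [33, 43], [34, 43, 44], [35, 44, 45], [36, 45, 46], [37, 46],
--                     [38, 39, 47], [39, 40, 48], [40, 41, 49], [41, 42, 50],
--                     [43, 51], [44, 51, 52], [45, 52, 53], [46, 53],
--                     [47, 48], [48, 49], [49, 50]]
--
-- def best_picks(pairs, vertices):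
--     greedy_vertices = {}
--     blocked = set()
--     accepted = 0
--     drop_point = 0
--     for i, pair in enumerate(pairs):
--         if pair[0] not in greedy_vertices:
--             greedy_vertices[pair[0]] = vertices[pair[0]]
--         if pair[1] not in greedy_vertices:
--             greedy_vertices[pair[1]] = vertices[pair[1]]
--         if pair[0] not in blocked and pair[1] not in blocked:
--             accepted += 1
--             blocked.add(pair[0])
--             blocked.add(pair[1])
--             blocked.update(vertex_neighbors[pair[0]])
--             blocked.update(vertex_neighbors[pair[1]])
--         if accepted == 4:
--             drop_point = i
--             break
--     return pairs[0:drop_point + 1], greedy_vertices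
-- ===== Notes on version B (the rewrite author's own statement) =====
-- stated objective: simpler
-- what changed: Replaces check_valid_pair's rescan of all previously accepted pairs (testing each new pair against every stored endpoint and that endpoint's neighbor list) by a single 'blocked' set maintained incrementally: when a pair is accepted its endpoints and their neighbors are added, and validity is two set-membership tests; the accepted-pairs list disappears entirely (only a counter remains).
-- outside the precondition, e.g. on best_picks([[100, 101]], {100: 0, 101: 1}): A returns ([[100, 101]], {100: 0, 101: 1}), B raises IndexError
import Mathlib
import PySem

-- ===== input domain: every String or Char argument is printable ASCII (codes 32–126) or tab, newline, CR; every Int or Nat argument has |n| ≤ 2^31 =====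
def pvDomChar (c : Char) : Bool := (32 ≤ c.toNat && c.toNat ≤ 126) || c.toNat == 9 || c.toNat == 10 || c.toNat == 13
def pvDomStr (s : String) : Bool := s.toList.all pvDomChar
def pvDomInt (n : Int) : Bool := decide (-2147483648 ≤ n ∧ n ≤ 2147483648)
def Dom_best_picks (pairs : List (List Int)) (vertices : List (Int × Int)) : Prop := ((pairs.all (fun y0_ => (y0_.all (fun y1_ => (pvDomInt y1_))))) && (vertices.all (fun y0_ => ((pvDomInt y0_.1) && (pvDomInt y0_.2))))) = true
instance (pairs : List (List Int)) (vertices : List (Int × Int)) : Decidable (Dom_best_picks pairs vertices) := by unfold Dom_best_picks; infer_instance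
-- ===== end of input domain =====

-- B replaces A's rescan of the accepted-pairs list (check_valid_pair) by an incrementally
-- maintained blocked-vertex set and an accepted counter; same return value, simpler validity test.


-- shared module-level constant (data, used by both ports)
def vertex_neighbors : List (List Int) :=
  [[3, 4], [4, 5], [5, 6],
   [0, 7], [0, 1, 8], [1, 2, 9], [2, 10],
   [3, 11, 12], [4, 12, 13], [5, 13, 14], [6, 14, 15],
   [7, 16], [7, 8, 17], [8, 9, 18], [9, 10, 19], [10, 20],
   [11, 21, 22], [12, 22, 23], [13, 23, 24], [14, 24, 25], [15, 25, 26],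
   [16, 27], [16, 17, 28], [17, 18, 29], [18, 19, 30], [19, 20, 31], [20, 32],
   [21, 33], [22, 33, 34], [23, 34, 35], [24, 35, 36], [25, 36, 37], [26, 37],
   [27, 28, 38], [28, 29, 39], [29, 30, 40], [30, 31, 41], [31, 32, 42],
   [33, 43], [34, 43, 44], [35, 44, 45], [36, 45, 46], [37, 46],
   [38, 39, 47], [39, 40, 48], [40, 41, 49], [41, 42, 50],
   [43, 51], [44, 51, 52], [45, 52, 53], [46, 53],
   [47, 48], [48, 49], [49, 50]]

-- ===== PORT A =====
-- check_valid_pair: scans every previously accepted pair (pyGetD defaults fire only outside Pre_)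
def check_valid_pair (pair : List Int) : List (List Int) → Bool
  | [] => true
  | each :: rest =>
    let x := PySem.List.pyGetD pair 0 0
    let y := PySem.List.pyGetD pair 1 0
    let a := PySem.List.pyGetD each 0 0
    let b := PySem.List.pyGetD each 1 0
    if x == a || x == b || y == a || y == b then false
    else if (PySem.List.pyGetD vertex_neighbors a []).contains x
         || (PySem.List.pyGetD vertex_neighbors b []).contains x
         || (PySem.List.pyGetD vertex_neighbors a []).contains y
         || (PySem.List.pyGetD vertex_neighbors b []).contains y then false
    else check_valid_pair pair rest

-- the for-loop of A: state = (greedy_pairs, greedy_vertices); returns (drop_point, greedy_vertices)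
def bestPicksGoA (vertices : List (Int × Int)) :
    List (List Int) → Int → List (List Int) → PySem.Dict Int Int → Int × PySem.Dict Int Int
  | [], _, _, gv => (0, gv)
  | p :: rest, i, gp, gv =>
    let p0 := PySem.List.pyGetD p 0 0
    let p1 := PySem.List.pyGetD p 1 0
    let gv := if gv.contains p0 then gv else gv.insert p0 ((PySem.Dict.mk vertices).getD p0 0)
    let gv := if gv.contains p1 then gv else gv.insert p1 ((PySem.Dict.mk vertices).getD p1 0)
    let gp := if check_valid_pair p gp then gp ++ [p] else gp
    if gp.length == 4 then (i, gv)
    else bestPicksGoA vertices rest (i + 1) gp gv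

def best_picks (pairs : List (List Int)) (vertices : List (Int × Int)) :
    List (List Int) × (List (Int × Int)) :=
  let r := bestPicksGoA vertices pairs 0 [] (PySem.Dict.mk [])
  (PySem.List.slice pairs (some 0) (some (r.1 + 1)), r.2.items)

-- ===== PORT B =====
-- the for-loop of B: state = (accepted count, blocked set, greedy_vertices); no accepted-pairs list
def bestPicksGoB (vertices : List (Int × Int)) :
    List (List Int) → Int → Nat → PySem.Set Int → PySem.Dict Int Int → Int × PySem.Dict Int Int
  | [], _, _, _, gv => (0, gv)
  | p :: rest, i, acc, blocked, gv =>
    let p0 := PySem.List.pyGetD p 0 0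
    let p1 := PySem.List.pyGetD p 1 0
    let gv := if gv.contains p0 then gv else gv.insert p0 ((PySem.Dict.mk vertices).getD p0 0)
    let gv := if gv.contains p1 then gv else gv.insert p1 ((PySem.Dict.mk vertices).getD p1 0)
    let st :=
      if !(PySem.Set.contains blocked p0) && !(PySem.Set.contains blocked p1) then
        (acc + 1,
         PySem.Set.update
           (PySem.Set.update (PySem.Set.add (PySem.Set.add blocked p0) p1)
             (PySem.List.pyGetD vertex_neighbors p0 []))
           (PySem.List.pyGetD vertex_neighbors p1 []))
      else (acc, blocked)
    if st.1 == 4 then (i, gv)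
    else bestPicksGoB vertices rest (i + 1) st.1 st.2 gv

def best_picks_alt (pairs : List (List Int)) (vertices : List (Int × Int)) :
    List (List Int) × (List (Int × Int)) :=
  let r := bestPicksGoB vertices pairs 0 0 PySem.Set.empty (PySem.Dict.mk [])
  (PySem.List.slice pairs (some 0) (some (r.1 + 1)), r.2.items)

-- ===== PRECONDITION & SPEC =====
-- Pre_ excludes exactly the raising accesses, stated closed-form over ALL pairs: every pair must
-- have length ≥ 2, both endpoints must be keys of the vertices dict, and both endpoints must be
-- valid Python indices into the 54-entry vertex_neighbors table.  This is slightly narrower than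
-- where A returns: A never touches pairs after its 4-pair break, and only consults
-- vertex_neighbors for endpoints of ACCEPTED pairs (see claim.json cites).
def Pre_best_picks (pairs : List (List Int)) (vertices : List (Int × Int)) : Prop :=
  ∀ p ∈ pairs, 2 ≤ p.length ∧
    (PySem.Dict.mk vertices).contains (PySem.List.pyGetD p 0 0) = true ∧
    (PySem.Dict.mk vertices).contains (PySem.List.pyGetD p 1 0) = true ∧
    (-54 ≤ PySem.List.pyGetD p 0 0 ∧ PySem.List.pyGetD p 0 0 < 54) ∧
    (-54 ≤ PySem.List.pyGetD p 1 0 ∧ PySem.List.pyGetD p 1 0 < 54)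
instance (pairs : List (List Int)) (vertices : List (Int × Int)) : Decidable (Pre_best_picks pairs vertices) := by unfold Pre_best_picks; infer_instance

def pvWitness_best_picks : List (List Int) × (List (Int × Int)) :=
  ([[0, 2], [1, 5]], [(0, 7), (2, 9), (1, 4), (5, 6)])

def Spec_best_picks (pairs : List (List Int)) (vertices : List (Int × Int)) (out : List (List Int) × (List (Int × Int))) : Prop := out = best_picks_alt pairs vertices
instance (pairs : List (List Int)) (vertices : List (Int × Int)) (out : List (List Int) × (List (Int × Int))) : Decidable (Spec_best_picks pairs vertices out) := by unfold Spec_best_picks; infer_instance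

-- ===== CLAIM (what is proved, stated in full; the proofs are below) =====
def Claim_equal_best_picks : Prop := ∀ (pairs : List (List Int)) (vertices : List (Int × Int)), Dom_best_picks pairs vertices → Pre_best_picks pairs vertices → Spec_best_picks pairs vertices (best_picks pairs vertices)

-- ===== LEMMAS AND PROOFS =====

-- the condition one stored pair `e` imposes on vertex v in check_valid_pair
def PairBlocks (e : List Int) (v : Int) : Prop :=
  v = PySem.List.pyGetD e 0 0 ∨ v = PySem.List.pyGetD e 1 0 ∨
  (PySem.List.pyGetD vertex_neighbors (PySem.List.pyGetD e 0 0) []).contains v = true ∨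
  (PySem.List.pyGetD vertex_neighbors (PySem.List.pyGetD e 1 0) []).contains v = true

lemma check_valid_pair_iff (pair : List Int) (gp : List (List Int)) :
    check_valid_pair pair gp = true ↔
      ∀ e ∈ gp, ¬ PairBlocks e (PySem.List.pyGetD pair 0 0) ∧
                ¬ PairBlocks e (PySem.List.pyGetD pair 1 0) := by
  induction gp with
  | nil => simp [check_valid_pair]
  | cons each rest ih =>
    simp only [check_valid_pair]
    split_ifs with h1 h2
    · simp only [false_iff]
      intro h
      have := h each (List.mem_cons_self)
      unfold PairBlocks at this
      simp only [Bool.or_eq_true, beq_iff_eq] at h1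
      tauto
    · simp only [false_iff]
      intro h
      have := h each (List.mem_cons_self)
      unfold PairBlocks at this
      simp only [Bool.or_eq_true] at h2
      tauto
    · rw [ih]
      simp only [Bool.or_eq_true, beq_iff_eq] at h1 h2
      push Not at h1 h2
      constructor
      · rintro h e he
        rcases List.mem_cons.1 he with rfl | he'
        · unfold PairBlocks; exact ⟨by tauto, by tauto⟩
        · exact h e he'
      · intro h e he; exact h e (List.mem_cons_of_mem _ he)

lemma set_contains_add (s : PySem.Set Int) (x v : Int) :
    PySem.Set.contains (PySem.Set.add s x) v = (PySem.Set.contains s v || v == x) := by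
  simp only [PySem.Set.add]
  split
  · rename_i h
    by_cases hv : v = x
    · subst hv; simp [PySem.Set.contains] at h ⊢; simp [h]
    · simp [hv]
  · apply Bool.eq_iff_iff.2; simp [PySem.Set.contains, beq_iff_eq]

lemma set_contains_update (xs : List Int) (s : PySem.Set Int) (v : Int) :
    PySem.Set.contains (PySem.Set.update s xs) v = (PySem.Set.contains s v || xs.contains v) := by
  induction xs generalizing s with
  | nil => simp [PySem.Set.update]
  | cons x rest ih =>
    unfold PySem.Set.update at *
    simp only [List.foldl_cons, ih (PySem.Set.add s x), set_contains_add]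
    apply Bool.eq_iff_iff.2
    simp [beq_iff_eq]
    tauto

-- the loop invariant: B's counter equals the length of A's accepted list, and B's blocked set
-- contains exactly the vertices some accepted pair blocks
lemma go_eq (vertices : List (Int × Int)) :
    ∀ (rest : List (List Int)) (i : Int) (gp : List (List Int)) (acc : Nat)
      (blocked : PySem.Set Int) (gv : PySem.Dict Int Int),
      acc = gp.length →
      (∀ v, PySem.Set.contains blocked v = true ↔ ∃ e ∈ gp, PairBlocks e v) →
      bestPicksGoA vertices rest i gp gv = bestPicksGoB vertices rest i acc blocked gv := by
  intro rest
  induction rest with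
  | nil => intro i gp acc blocked gv _ _; rfl
  | cons p tl ih =>
    intro i gp acc blocked gv hacc hinv
    have hcond : check_valid_pair p gp
        = (!(PySem.Set.contains blocked (PySem.List.pyGetD p 0 0))
           && !(PySem.Set.contains blocked (PySem.List.pyGetD p 1 0))) := by
      by_cases hc : check_valid_pair p gp = true
      · rw [hc]
        rw [check_valid_pair_iff] at hc
        have h0 : PySem.Set.contains blocked (PySem.List.pyGetD p 0 0) = false := by
          by_contra h
          rw [Bool.not_eq_false, hinv] at h
          obtain ⟨e, he, hb⟩ := h
          exact (hc e he).1 hb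
        have h1 : PySem.Set.contains blocked (PySem.List.pyGetD p 1 0) = false := by
          by_contra h
          rw [Bool.not_eq_false, hinv] at h
          obtain ⟨e, he, hb⟩ := h
          exact (hc e he).2 hb
        rw [h0, h1]
        rfl
      · rw [Bool.not_eq_true] at hc
        rw [hc]
        have hex : ¬ ∀ e ∈ gp, ¬ PairBlocks e (PySem.List.pyGetD p 0 0) ∧
                           ¬ PairBlocks e (PySem.List.pyGetD p 1 0) := by
          rw [← check_valid_pair_iff, hc]; simp
        push Not at hex
        obtain ⟨e, he, hb⟩ := hex
        by_cases hP : PairBlocks e (PySem.List.pyGetD p 0 0)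
        · have h0 : PySem.Set.contains blocked (PySem.List.pyGetD p 0 0) = true :=
            (hinv _).2 ⟨e, he, hP⟩
          rw [h0]
          rfl
        · have h1 : PySem.Set.contains blocked (PySem.List.pyGetD p 1 0) = true :=
            (hinv _).2 ⟨e, he, hb hP⟩
          rw [h1]
          simp
    simp only [bestPicksGoA, bestPicksGoB, hcond]
    cases hb : (!(PySem.Set.contains blocked (PySem.List.pyGetD p 0 0))
           && !(PySem.Set.contains blocked (PySem.List.pyGetD p 1 0))) with
    | false =>
      simp only [Bool.false_eq_true, if_false, ← hacc]
      cases h4 : (acc == 4) with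
      | true => simp only [if_true]
      | false =>
        simp only [Bool.false_eq_true, if_false]
        exact ih _ _ _ _ _ hacc hinv
    | true =>
      simp only [if_true]
      have hlen : ((gp ++ [p]).length == 4) = ((acc + 1) == 4) := by
        simp [hacc]
      rw [hlen]
      cases h4 : ((acc + 1) == 4) with
      | true => simp only [if_true]
      | false =>
        simp only [Bool.false_eq_true, if_false]
        apply ih
        · simp [hacc]
        · intro v
          rw [set_contains_update, set_contains_update, set_contains_add, set_contains_add]
          simp only [Bool.or_eq_true, hinv v, beq_iff_eq, List.mem_append, List.mem_singleton,
            PairBlocks, List.contains_iff_mem, or_and_right, exists_or, exists_eq_left]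
          simp only [or_assoc]

-- ===== VERDICT (by name: the statement is the Claim_ definition above) =====
theorem best_picks_spec : Claim_equal_best_picks := by
  intro pairs vertices _ _
  unfold Spec_best_picks best_picks best_picks_alt
  rw [go_eq vertices pairs 0 [] 0 PySem.Set.empty (PySem.Dict.mk []) rfl
    (by intro v; simp [PySem.Set.empty, PySem.Set.contains])]
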